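-- pv_equiv track=rewrite | github.com/mushcatshiro/mahjong | fan.py | san_se_shuang_long_hui
-- ===== SOURCE A (Python) =====
-- def san_se_shuang_long_hui(merged_suites: dict):
--     # 三色双龙会，三种花色，两种花色的两副老少副和第三种花色5的将牌
--     # cal_ping_hu = False
--     # cal_lao_shao_fu = False
--     # cal_xi_xiang_feng = False
--     # cal_wu_zi = False
--     if len(merged_suites) != 3:
--         return False
--     lao_shao_fu_suite = []
--     jiang_pai_suite = ""
--     for suite, tiles in merged_suites.items():
--         joined = "".join(tiles)
--         if joined != "123789" and joined != "55":
--             return False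
--         if joined == "123789":
--             lao_shao_fu_suite.append(suite)
--         if joined == "55":
--             jiang_pai_suite = suite
--     if jiang_pai_suite in lao_shao_fu_suite or len(lao_shao_fu_suite) != 2:
--         return False
--     return True
-- ===== SOURCE B (Python) =====
-- def san_se_shuang_long_hui(merged_suites: dict):
--     # Normalize-and-compare: sort the joined tile strings and compare to the canonical pattern.
--     return sorted("".join(tiles) for tiles in merged_suites.values()) == ["123789", "123789", "55"]
-- ===== Notes on version B (the rewrite author's own statement) =====
-- stated objective: simpler
-- what changed: Replaced the loop with two accumulators, early returns and post-loop reconciliation (including a vacuous membership guard) by one sort-and-compare of the joined tile strings against the canonical list.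
import Mathlib
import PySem

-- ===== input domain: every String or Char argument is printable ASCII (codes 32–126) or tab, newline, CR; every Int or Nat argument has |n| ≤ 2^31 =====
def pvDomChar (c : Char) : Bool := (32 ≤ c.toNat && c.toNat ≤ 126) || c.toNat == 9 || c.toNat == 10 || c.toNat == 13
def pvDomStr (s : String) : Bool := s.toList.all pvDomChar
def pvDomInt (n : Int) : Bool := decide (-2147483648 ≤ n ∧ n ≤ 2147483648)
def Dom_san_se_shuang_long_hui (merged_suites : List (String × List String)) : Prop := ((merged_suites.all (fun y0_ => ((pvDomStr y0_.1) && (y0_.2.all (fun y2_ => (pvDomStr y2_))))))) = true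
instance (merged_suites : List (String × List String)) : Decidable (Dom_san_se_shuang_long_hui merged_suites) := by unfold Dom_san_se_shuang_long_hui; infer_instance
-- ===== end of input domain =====

-- B replaces A's accumulator loop + post-loop reconciliation by one sort-and-compare against the canonical pattern list (objective: simpler).


-- ===== PORT A =====
-- the for-loop over merged_suites.items() with its two accumulators and early returns
def pvLoopA : List (String × List String) → List String → String → Bool
  | [], lao_shao_fu_suite, jiang_pai_suite =>
      if jiang_pai_suite ∈ lao_shao_fu_suite ∨ lao_shao_fu_suite.length ≠ 2 then false
      else true
  | (suite, tiles) :: rest, lao_shao_fu_suite, jiang_pai_suite =>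
      let joined := PySem.Str.join "" tiles
      if joined ≠ "123789" ∧ joined ≠ "55" then false
      else
        pvLoopA rest
          (if joined = "123789" then lao_shao_fu_suite ++ [suite] else lao_shao_fu_suite)
          (if joined = "55" then suite else jiang_pai_suite)

def san_se_shuang_long_hui (merged_suites : List (String × List String)) : Bool :=
  if merged_suites.length ≠ 3 then false
  else pvLoopA merged_suites [] ""

-- ===== PORT B =====
def san_se_shuang_long_hui_alt (merged_suites : List (String × List String)) : Bool :=
  decide (PySem.List.sorted (merged_suites.map (fun p => PySem.Str.join "" p.2)) (fun x => x) false
          = ["123789", "123789", "55"])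

-- ===== PRECONDITION & SPEC =====
-- Pre_ excludes association lists with duplicate keys, which cannot arise from a Python dict
-- (A's argument is a dict, whose keys are distinct by construction).
def Pre_san_se_shuang_long_hui (merged_suites : List (String × List String)) : Prop :=
  (merged_suites.map Prod.fst).Nodup
instance (merged_suites : List (String × List String)) : Decidable (Pre_san_se_shuang_long_hui merged_suites) := by unfold Pre_san_se_shuang_long_hui; infer_instance

def pvWitness_san_se_shuang_long_hui : (List (String × List String)) :=
  [("a", ["1","2","3","7","8","9"]), ("b", ["1","2","3","7","8","9"]), ("c", ["5","5"])]

def Spec_san_se_shuang_long_hui (merged_suites : List (String × List String)) (out : Bool) : Prop := out = san_se_shuang_long_hui_alt merged_suites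
instance (merged_suites : List (String × List String)) (out : Bool) : Decidable (Spec_san_se_shuang_long_hui merged_suites out) := by unfold Spec_san_se_shuang_long_hui; infer_instance

-- ===== CLAIM (what is proved, stated in full; the proofs are below) =====
def Claim_equal_san_se_shuang_long_hui : Prop := ∀ (merged_suites : List (String × List String)), Dom_san_se_shuang_long_hui merged_suites → Pre_san_se_shuang_long_hui merged_suites → Spec_san_se_shuang_long_hui merged_suites (san_se_shuang_long_hui merged_suites)

-- ===== LEMMAS AND PROOFS =====

lemma pv_lt_lit : ("123789" : String) < "55" := by
  rw [String.lt_iff_toList_lt]; decide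

-- A joined string that is neither "123789" nor "55" blocks the permutation.
lemma pv_not_perm (j : String) (h1 : j ≠ "123789") (h2 : j ≠ "55")
    (js : List String) (hm : j ∈ js) :
    ¬ js.Perm ["123789", "123789", "55"] := by
  intro hp
  have := hp.mem_iff.mp hm
  simp at this
  rcases this with h' | h' <;> [exact h1 h'; exact h2 h']

-- Same, for what remains after simp cancels a matched "123789" head.
lemma pv_not_perm2 (j : String) (h1 : j ≠ "123789") (h2 : j ≠ "55")
    (js : List String) (hm : j ∈ js) :
    ¬ js.Perm ["123789", "55"] := by
  intro hp
  have := hp.mem_iff.mp hm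
  simp at this
  rcases this with h' | h' <;> [exact h1 h'; exact h2 h']

-- sorted js = target ↔ js ~ target (the target list is already sorted).
lemma pv_sorted_eq_iff (js : List String) :
    (PySem.List.sorted js (fun x => x) false = ["123789", "123789", "55"])
      ↔ js.Perm ["123789", "123789", "55"] := by
  constructor
  · intro h
    exact (PySem.List.sorted_perm js (fun x => x) false).symm.trans (h ▸ List.Perm.refl _)
  · intro h
    refine PySem.List.sorted_id_eq_of_perm_of_pairwise js ["123789", "123789", "55"] h.symm ?_
    · refine List.Pairwise.cons ?_ (List.Pairwise.cons ?_ (List.pairwise_singleton _ _))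
      · intro y hy
        simp at hy
        rcases hy with h' | h' <;> subst h'
        · exact le_refl _
        · exact le_of_lt pv_lt_lit
      · intro y hy
        simp at hy
        subst hy
        exact le_of_lt pv_lt_lit

-- ===== VERDICT (by name: the statement is the Claim_ definition above) =====
theorem san_se_shuang_long_hui_spec : Claim_equal_san_se_shuang_long_hui := by
  intro ms _ hpre
  unfold Spec_san_se_shuang_long_hui san_se_shuang_long_hui san_se_shuang_long_hui_alt
  by_cases hlen : ms.length = 3
  · match ms, hlen with
    | [(k1, t1), (k2, t2), (k3, t3)], _ =>
      simp only [Pre_san_se_shuang_long_hui, List.map, List.nodup_cons, List.mem_cons,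
        List.not_mem_nil, or_false, not_or] at hpre
      obtain ⟨⟨h12, h13⟩, h23, -⟩ := hpre
      simp only [List.map, List.length_cons, List.length_nil]
      rw [if_neg (by omega)]
      simp only [pvLoopA]
      simp only [pv_sorted_eq_iff]
      have hn13 := Ne.symm h13
      have hn23 := Ne.symm h23
      have hn12 := Ne.symm h12
      by_cases a1 : PySem.Str.join "" t1 = "123789" <;> by_cases b1 : PySem.Str.join "" t1 = "55" <;>
        by_cases a2 : PySem.Str.join "" t2 = "123789" <;> by_cases b2 : PySem.Str.join "" t2 = "55" <;>
          by_cases a3 : PySem.Str.join "" t3 = "123789" <;> by_cases b3 : PySem.Str.join "" t3 = "55" <;>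
            simp_all <;>
      first
        | decide
        | (exact pv_not_perm _ (by assumption) (by assumption) _ (by simp))
        | (exact pv_not_perm2 _ (by assumption) (by assumption) _ (by simp))
  · rw [if_pos (by omega)]
    symm
    rw [decide_eq_false_iff_not]
    intro h
    have hperm := (pv_sorted_eq_iff _).mp (by simpa using h)
    have := hperm.length_eq
    simp at this
    omega
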